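-- pv_equiv track=rewrite | github.com/kuserich/YouMayNotNeedAttention | scripts/epsilon_stats.py | reduce_consecutive_tokens
-- ===== SOURCE A (Python) =====
-- def reduce_consecutive_tokens(aList):
--     consecutive_tokens = []
--     num_consecutive = 0
--     x = 0
--     for x in aList:
--         if x == 1:
--             num_consecutive += 1
--         elif x == 0 and num_consecutive != 0:
--             consecutive_tokens.append(num_consecutive)
--             num_consecutive = 0
--     if x != 0 and num_consecutive != 0:
--         consecutive_tokens.append(num_consecutive)
--         num_consecutive = 0
--     return consecutive_tokens
-- ===== SOURCE B (Python) =====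
-- def reduce_consecutive_tokens(aList):
--     # Segment-then-count: split the list into maximal segments between 0s,
--     # then report the number of 1s in each segment, skipping empty counts.
--     segs = []
--     cur = []
--     for v in aList:
--         if v == 0:
--             segs.append(cur)
--             cur = []
--         else:
--             cur.append(v)
--     segs.append(cur)
--     out = []
--     for seg in segs:
--         c = seg.count(1)
--         if c != 0:
--             out.append(c)
--     return out
-- ===== Notes on version B (the rewrite author's own statement) =====
-- stated objective: alternative
-- what changed: Replaces A's running counter with a stale-loop-variable final check by a segment-then-count decomposition: first split the list into the maximal segments between 0s, then count the 1s per segment and keep the nonzero counts.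
import Mathlib
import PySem

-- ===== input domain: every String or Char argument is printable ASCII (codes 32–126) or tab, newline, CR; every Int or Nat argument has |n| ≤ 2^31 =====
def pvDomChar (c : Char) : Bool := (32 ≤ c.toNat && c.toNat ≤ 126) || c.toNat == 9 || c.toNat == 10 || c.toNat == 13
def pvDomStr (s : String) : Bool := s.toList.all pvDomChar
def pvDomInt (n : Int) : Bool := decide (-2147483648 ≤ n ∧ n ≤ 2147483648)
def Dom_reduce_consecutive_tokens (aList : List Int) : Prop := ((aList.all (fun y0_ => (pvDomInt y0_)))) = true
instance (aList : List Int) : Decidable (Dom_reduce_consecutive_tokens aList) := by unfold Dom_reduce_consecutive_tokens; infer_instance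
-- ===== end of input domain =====

-- B replaces A's running counter (and its final check on the stale loop variable) with a
-- segment-then-count decomposition of the same O(n) cost ("alternative", not faster).

-- ===== PORT A =====
-- state: (consecutive_tokens, num_consecutive, x) — x is Python's leftover loop variable
def reduce_consecutive_tokens (aList : List Int) : List Int :=
  let st := aList.foldl
    (fun (st : List Int × Int × Int) x =>
      if x = 1 then (st.1, st.2.1 + 1, x)
      else if x = 0 ∧ st.2.1 ≠ 0 then (st.1 ++ [st.2.1], 0, x)
      else (st.1, st.2.1, x))
    ([], 0, 0)
  if st.2.2 ≠ 0 ∧ st.2.1 ≠ 0 then st.1 ++ [st.2.1] else st.1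

-- ===== PORT B =====
-- first loop of Source B: collect the maximal segments between 0s; state (segs, cur)
def reduce_consecutive_tokens_alt (aList : List Int) : List Int :=
  let st := aList.foldl
    (fun (st : List (List Int) × List Int) v =>
      if v = 0 then (st.1 ++ [st.2], []) else (st.1, st.2 ++ [v]))
    ([], [])
  let segs := st.1 ++ [st.2]
  -- second loop of Source B: keep the nonzero counts of 1s
  segs.foldl
    (fun out seg =>
      if (PySem.List.count seg 1 : Int) ≠ 0 then out ++ [(PySem.List.count seg 1 : Int)] else out)
    []

-- ===== PRECONDITION & SPEC =====
def Spec_reduce_consecutive_tokens (aList : List Int) (out : List Int) : Prop := out = reduce_consecutive_tokens_alt aList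
instance (aList : List Int) (out : List Int) : Decidable (Spec_reduce_consecutive_tokens aList out) := by unfold Spec_reduce_consecutive_tokens; infer_instance

-- ===== CLAIM (what is proved, stated in full; the proofs are below) =====
def Claim_equal_reduce_consecutive_tokens : Prop := ∀ (aList : List Int), Dom_reduce_consecutive_tokens aList → Spec_reduce_consecutive_tokens aList (reduce_consecutive_tokens aList)

-- ===== LEMMAS AND PROOFS =====

-- the counts B emits for a list of segments
def pvEmit (segs : List (List Int)) : List Int :=
  (segs.map (fun seg => (PySem.List.count seg 1 : Int))).filter (· ≠ 0)

theorem pvEmit_append (s t : List (List Int)) : pvEmit (s ++ t) = pvEmit s ++ pvEmit t := by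
  simp [pvEmit]

-- A's loop, its finalizer, and B's segmentation loop, named for the proofs
def pvFoldA (xs : List Int) (st : List Int × Int × Int) : List Int × Int × Int :=
  xs.foldl
    (fun (st : List Int × Int × Int) x =>
      if x = 1 then (st.1, st.2.1 + 1, x)
      else if x = 0 ∧ st.2.1 ≠ 0 then (st.1 ++ [st.2.1], 0, x)
      else (st.1, st.2.1, x)) st

def pvFinA (st : List Int × Int × Int) : List Int :=
  if st.2.2 ≠ 0 ∧ st.2.1 ≠ 0 then st.1 ++ [st.2.1] else st.1

def pvFoldB (xs : List Int) (st : List (List Int) × List Int) : List (List Int) × List Int :=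
  xs.foldl
    (fun (st : List (List Int) × List Int) v =>
      if v = 0 then (st.1 ++ [st.2], []) else (st.1, st.2 ++ [v])) st

-- main invariant: A's fold from (pvEmit segs, count cur 1, x0) finishes like B's fold from (segs, cur)
theorem pv_main (xs : List Int) : ∀ (segs : List (List Int)) (cur : List Int) (x0 : Int),
    (x0 = 0 → PySem.List.count cur 1 = 0) →
    pvFinA (pvFoldA xs (pvEmit segs, (PySem.List.count cur 1 : Int), x0))
    = pvEmit ((pvFoldB xs (segs, cur)).1 ++ [(pvFoldB xs (segs, cur)).2]) := by
  unfold pvFoldA pvFinA pvFoldB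
  simp only [PySem.List.count_eq]
  induction xs with
  | nil =>
    intro segs cur x0 h
    simp only [List.foldl_nil, pvEmit_append]
    by_cases hc : List.count 1 cur = 0
    · simp [pvEmit, hc]
    · have hx0 : x0 ≠ 0 := fun he => hc (h he)
      simp [pvEmit, hx0, hc]
  | cons v xs ih =>
    intro segs cur x0 h
    simp only [List.foldl_cons]
    by_cases hv1 : v = 1
    · subst hv1
      have := ih segs (cur ++ [1]) 1 (by simp)
      simp only [List.count_append, List.count_singleton] at this
      simpa using this
    · by_cases hv0 : v = 0
      · subst hv0
        have := ih (segs ++ [cur]) [] 0 (by simp)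
        by_cases hc : List.count 1 cur = 0
        · have he : pvEmit (segs ++ [cur]) = pvEmit segs := by
            simp [pvEmit, hc]
          rw [he] at this
          simp only [List.count_nil, Nat.cast_zero] at this
          simpa [hc] using this
        · have he : pvEmit (segs ++ [cur]) = pvEmit segs ++ [((List.count 1 cur : Nat) : Int)] := by
            simp [pvEmit, hc]
          rw [he] at this
          simp only [List.count_nil, Nat.cast_zero] at this
          have hcz : ((List.count 1 cur : Nat) : Int) ≠ 0 := by
            exact_mod_cast hc
          simpa [hc, hcz] using this
      · have := ih segs (cur ++ [v]) v (fun he => absurd he hv0)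
        have h1 : List.count 1 [v] = 0 := by
          simp only [List.count_eq_zero, List.mem_singleton]
          exact fun h => hv1 h.symm
        have hcnt : List.count 1 (cur ++ [v]) = List.count 1 cur := by
          simp [List.count_append, h1]
        rw [hcnt] at this
        simpa [hv1, hv0] using this

theorem pv_emit_loop (segs : List (List Int)) : ∀ (acc : List Int),
    segs.foldl
      (fun out seg =>
        if (PySem.List.count seg 1 : Int) ≠ 0 then out ++ [(PySem.List.count seg 1 : Int)] else out)
      acc = acc ++ pvEmit segs := by
  induction segs with
  | nil => intro acc; simp [pvEmit]
  | cons s t ih =>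
    intro acc
    simp only [List.foldl_cons, PySem.List.count_eq] at *
    by_cases hc : List.count 1 s = 0
    · have h2 : ¬(((List.count 1 s : Nat) : Int) ≠ 0) := by simp [hc]
      rw [if_neg h2, ih]
      simp [pvEmit, hc]
    · have h2 : ((List.count 1 s : Nat) : Int) ≠ 0 := by exact_mod_cast hc
      rw [if_pos h2, ih]
      simp [pvEmit, hc]

theorem pv_alt_eq (aList : List Int) :
    reduce_consecutive_tokens_alt aList =
    pvEmit ((pvFoldB aList ([], [])).1 ++ [(pvFoldB aList ([], [])).2]) := by
  unfold reduce_consecutive_tokens_alt pvFoldB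
  rw [pv_emit_loop]
  simp

-- ===== VERDICT (by name: the statement is the Claim_ definition above) =====
theorem reduce_consecutive_tokens_spec : Claim_equal_reduce_consecutive_tokens := by
  intro aList _
  unfold Spec_reduce_consecutive_tokens
  rw [pv_alt_eq]
  have := pv_main aList [] [] 0 (by simp [PySem.List.count_eq])
  simpa [pvEmit, PySem.List.count_eq, reduce_consecutive_tokens, pvFoldA, pvFinA] using this
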